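-- pv_equiv track=rewrite | github.com/wanglongjiang/leetcode | medium/2438-range-product-queries-of-powers.py | productQueries
-- ===== SOURCE A (Python) =====
-- import itertools
-- from typing import List
--
-- def productQueries(n: int, queries: List[List[int]]) -> List[int]:
--     # 计算出构成n的指数数组
--     indexs = []
--     i = 0
--     while n:
--         if n & 1:
--             indexs.append(i)
--         n >>= 1
--         i += 1
--     # 计算指数数组的前缀和
--     pres = list(itertools.accumulate(indexs))
--     # 计算答案
--     ans, mod = [], 10**9 + 7
--     for q in queries:
--         ans.append((1 << (pres[q[1]] if q[0] == 0 else pres[q[1]] - pres[q[0] - 1])) % mod)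
--     return ans
-- ===== SOURCE B (Python) =====
-- from typing import List
--
-- def productQueries(n: int, queries: List[List[int]]) -> List[int]:
--     mod = 10**9 + 7
--     # collect the actual powers of two making up n
--     powers = []
--     p = 1
--     while n:
--         if n & 1:
--             powers.append(p)
--         n >>= 1
--         p <<= 1
--     ans = []
--     for q in queries:
--         prod = 1
--         for j in range(q[0], q[1] + 1):
--             prod = prod * powers[j] % mod
--         ans.append(prod)
--     return ans
-- ===== Notes on version B (the rewrite author's own statement) =====
-- stated objective: alternative
-- what changed: B stores the actual powers of two of n's set bits and answers each query with a running modular product over the range, instead of A's prefix-summed exponent array and one big left shift per query.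
-- outside the precondition, e.g. on productQueries(6, [[-1, 1]]): A returns [4], B returns [32]; on productQueries(0, [[0, 0]]): A raises IndexError, B raises IndexError
import Mathlib
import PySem

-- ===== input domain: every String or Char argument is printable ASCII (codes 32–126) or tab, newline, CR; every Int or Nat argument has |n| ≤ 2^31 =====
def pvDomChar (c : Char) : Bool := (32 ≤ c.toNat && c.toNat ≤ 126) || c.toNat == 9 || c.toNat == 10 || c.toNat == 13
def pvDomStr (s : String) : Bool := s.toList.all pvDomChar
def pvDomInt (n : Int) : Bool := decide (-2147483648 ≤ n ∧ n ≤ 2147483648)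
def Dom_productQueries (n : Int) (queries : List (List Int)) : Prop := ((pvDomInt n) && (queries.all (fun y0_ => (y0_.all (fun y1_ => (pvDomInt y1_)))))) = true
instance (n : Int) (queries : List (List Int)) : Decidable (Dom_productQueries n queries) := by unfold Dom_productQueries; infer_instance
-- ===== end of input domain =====

-- B answers each range query with a running modular product over the stored powers of two,
-- instead of A's prefix-summed exponents and one big left shift; same results on Pre_.

-- ===== PORT A =====
-- the `while n:` bit loop; `n >>= 1` is floor division by 2 (exact); the `0 < n` guard only makes
-- the recursion total (Python's loop diverges for n < 0, which Pre_ excludes, and stops at n = 0)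
def pvIndexsA (n : Int) (i : Int) : List Int :=
  if _h : 0 < n then
    (if PySem.Int.band n 1 ≠ 0 then [i] else []) ++ pvIndexsA (PySem.Int.floordiv n 2) (i + 1)
  else []
termination_by n.toNat
decreasing_by
  rw [PySem.Int.floordiv_eq_ediv_of_pos (by norm_num : (0:Int) < 2)]
  omega

-- itertools.accumulate
def pvAccum (xs : List Int) (acc : Int) : List Int :=
  match xs with
  | [] => []
  | x :: t => (acc + x) :: pvAccum t (acc + x)

def productQueries (n : Int) (queries : List (List Int)) : List Int :=
  let indexs := pvIndexsA n 0
  let pres := pvAccum indexs 0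
  let md : Int := 10 ^ 9 + 7
  queries.foldl (fun ans q =>
    let e : Int :=
      if PySem.List.pyGetD q 0 0 = 0 then PySem.List.pyGetD pres (PySem.List.pyGetD q 1 0) 0
      else PySem.List.pyGetD pres (PySem.List.pyGetD q 1 0) 0
           - PySem.List.pyGetD pres (PySem.List.pyGetD q 0 0 - 1) 0
    -- `1 << e` (raises for e < 0, excluded by Pre_; `.toNat` is only the totality guard)
    ans ++ [PySem.Int.mod ((1 : Int) <<< e.toNat) md]) []

-- ===== PORT B =====
-- same bit loop, but storing the actual powers of two (`p <<= 1` is `p * 2`)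
def pvPowersB (n : Int) (p : Int) : List Int :=
  if _h : 0 < n then
    (if PySem.Int.band n 1 ≠ 0 then [p] else []) ++ pvPowersB (PySem.Int.floordiv n 2) (p * 2)
  else []
termination_by n.toNat
decreasing_by
  rw [PySem.Int.floordiv_eq_ediv_of_pos (by norm_num : (0:Int) < 2)]
  omega

def productQueries_alt (n : Int) (queries : List (List Int)) : List Int :=
  let md : Int := 10 ^ 9 + 7
  let powers := pvPowersB n 1
  queries.foldl (fun ans q =>
    let prod := (PySem.List.pyRange (PySem.List.pyGetD q 0 0) (PySem.List.pyGetD q 1 0 + 1) 1).foldl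
      (fun prod j => PySem.Int.mod (prod * PySem.List.pyGetD powers j 0) md) 1
    ans ++ [prod]) []

-- ===== PRECONDITION & SPEC =====
-- Pre_ admits the natural domain: n ≥ 0 (A's bit loop diverges for negative n) and each query
-- [l, r] with 0 ≤ l ≤ r < popcount n; outside it A raises (IndexError/ValueError), and for
-- in-range NEGATIVE l or r A returns a value produced by Python's negative-index wraparound into
-- the prefix array, an accident of A's implementation which B's wraparound reproduces differently.
def Pre_productQueries (n : Int) (queries : List (List Int)) : Prop :=
  0 ≤ n ∧ ∀ q ∈ queries, 2 ≤ q.length ∧ 0 ≤ q.getD 0 0 ∧ q.getD 0 0 ≤ q.getD 1 0 ∧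
    q.getD 1 0 < (PySem.Int.bitCount n : Int)
instance (n : Int) (queries : List (List Int)) : Decidable (Pre_productQueries n queries) := by
  unfold Pre_productQueries; infer_instance

def pvWitness_productQueries : Int × List (List Int) := (6, [[0, 1], [1, 1]])

def Spec_productQueries (n : Int) (queries : List (List Int)) (out : List Int) : Prop := out = productQueries_alt n queries
instance (n : Int) (queries : List (List Int)) (out : List Int) : Decidable (Spec_productQueries n queries out) := by unfold Spec_productQueries; infer_instance

-- ===== CLAIM (what is proved, stated in full; the proofs are below) =====
def Claim_equal_productQueries : Prop := ∀ (n : Int) (queries : List (List Int)), Dom_productQueries n queries → Pre_productQueries n queries → Spec_productQueries n queries (productQueries n queries)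

-- ===== LEMMAS AND PROOFS =====

-- the list of set-bit positions of a natural number (proof-side abstraction of both bit loops)
def pvNatBits (m : Nat) : List Nat :=
  if m = 0 then [] else (if m % 2 = 1 then [0] else []) ++ (pvNatBits (m / 2)).map (· + 1)
decreasing_by omega

lemma pvIndexsA_eq : ∀ (m : Nat) (n i : Int), n.toNat = m →
    pvIndexsA n i = (pvNatBits m).map (fun b : Nat => i + (b : Int)) := by
  intro m
  induction m using Nat.strong_induction_on with
  | _ m ih =>
    intro n i hm
    rw [pvIndexsA, pvNatBits]
    by_cases h : 0 < n
    · have hn : n = (m : Int) := by omega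
      subst hn
      have hm0 : m ≠ 0 := by omega
      simp only [dif_pos h, if_neg hm0]
      have hband : PySem.Int.band (m : Int) 1 = ((m % 2 : Nat) : Int) := by
        simp [PySem.Int.band]
      have hdiv : PySem.Int.floordiv (m : Int) 2 = ((m / 2 : Nat) : Int) := by
        exact_mod_cast PySem.Int.floordiv_natCast m 2
      rw [hband, hdiv, ih (m / 2) (by omega) _ (i + 1) (by omega), List.map_append,
        List.map_map]
      have hmap : (pvNatBits (m / 2)).map ((fun b : Nat => i + (b : Int)) ∘ (· + 1))
          = (pvNatBits (m / 2)).map (fun b : Nat => (i + 1) + (b : Int)) := by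
        apply List.map_congr_left
        intro b _
        simp only [Function.comp]
        push_cast
        ring
      rw [hmap]
      rcases Nat.mod_two_eq_zero_or_one m with h2 | h2 <;> simp [h2]
    · have hm0 : m = 0 := by omega
      simp [dif_neg h, hm0]

lemma pvPowersB_eq : ∀ (m : Nat) (n p : Int), n.toNat = m →
    pvPowersB n p = (pvNatBits m).map (fun b : Nat => p * (2 : Int) ^ b) := by
  intro m
  induction m using Nat.strong_induction_on with
  | _ m ih =>
    intro n p hm
    rw [pvPowersB, pvNatBits]
    by_cases h : 0 < n
    · have hn : n = (m : Int) := by omega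
      subst hn
      have hm0 : m ≠ 0 := by omega
      simp only [dif_pos h, if_neg hm0]
      have hband : PySem.Int.band (m : Int) 1 = ((m % 2 : Nat) : Int) := by
        simp [PySem.Int.band]
      have hdiv : PySem.Int.floordiv (m : Int) 2 = ((m / 2 : Nat) : Int) := by
        exact_mod_cast PySem.Int.floordiv_natCast m 2
      rw [hband, hdiv, ih (m / 2) (by omega) _ (p * 2) (by omega), List.map_append,
        List.map_map]
      have hmap : (pvNatBits (m / 2)).map ((fun b : Nat => p * (2 : Int) ^ b) ∘ (· + 1))
          = (pvNatBits (m / 2)).map (fun b : Nat => (p * 2) * (2 : Int) ^ b) := by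
        apply List.map_congr_left
        intro b _
        simp only [Function.comp]
        ring
      rw [hmap]
      rcases Nat.mod_two_eq_zero_or_one m with h2 | h2 <;> simp [h2]
    · have hm0 : m = 0 := by omega
      simp [dif_neg h, hm0]

lemma pvNatBits_length : ∀ m : Nat, (pvNatBits m).length = PySem.Int.bitCount (m : Int) := by
  intro m
  induction m using Nat.strong_induction_on with
  | _ m ih =>
    rw [pvNatBits]
    by_cases hm0 : m = 0
    · simp [hm0, PySem.Int.bitCount_zero]
    · rw [if_neg hm0, PySem.Int.bitCount_natCast (by omega : 0 < m), ← ih (m / 2) (by omega)]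
      rcases Nat.mod_two_eq_zero_or_one m with h2 | h2
      · simp [h2]
      · simp [h2]
        omega

lemma pvAccum_length : ∀ (xs : List Int) (c : Int), (pvAccum xs c).length = xs.length := by
  intro xs
  induction xs with
  | nil => intro c; rfl
  | cons x t ih => intro c; simp [pvAccum, ih]

lemma pvAccum_getD : ∀ (xs : List Int) (c : Int) (j : Nat), j < xs.length →
    (pvAccum xs c).getD j 0 = c + ((xs.take (j + 1)).sum) := by
  intro xs
  induction xs with
  | nil => intro c j h; simp at h
  | cons x t ih =>
    intro c j h
    cases j with
    | zero => simp [pvAccum]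
    | succ j =>
      simp only [pvAccum, List.getD_cons_succ, List.take_succ_cons, List.sum_cons]
      rw [ih (c + x) j (by simpa using h)]
      ring

lemma pvCastSum : ∀ es : List Nat, ((es.map (fun b : Nat => (b : Int))).sum = (es.sum : Int)) := by
  intro es
  induction es with
  | nil => rfl
  | cons e t ih =>
    simp only [List.map_cons, List.sum_cons, ih]
    push_cast
    ring

-- fold over range indices = fold over the corresponding slice
lemma pvFoldRange (M : Int) (xs : List Int) : ∀ (d a : Nat) (c : Int), a + d ≤ xs.length →
    (PySem.List.pyRange (a : Int) ((a + d : Nat) : Int) 1).foldl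
      (fun p j => PySem.Int.mod (p * PySem.List.pyGetD xs j 0) M) c
    = ((xs.drop a).take d).foldl (fun p x => PySem.Int.mod (p * x) M) c := by
  intro d
  induction d with
  | zero =>
    intro a c h
    rw [PySem.List.pyRange_one_eq_nil (by push_cast; omega)]
    simp
  | succ d ih =>
    intro a c h
    rw [PySem.List.pyRange_one_cons (by push_cast; omega)]
    have ha : a < xs.length := by omega
    have hdrop : xs.drop a = xs[a] :: xs.drop (a + 1) := List.drop_eq_getElem_cons ha
    have hget : PySem.List.pyGetD xs (a : Int) 0 = xs[a] := by
      rw [PySem.List.pyGetD_natCast]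
      exact List.getD_eq_getElem xs 0 ha
    have hcast : ((a : Int) + 1) = ((a + 1 : Nat) : Int) := by push_cast; ring
    have hcast2 : ((a + (d + 1) : Nat) : Int) = (((a + 1) + d : Nat) : Int) := by push_cast; ring
    rw [hdrop]
    simp only [List.take_succ_cons, List.foldl_cons, hget, hcast, hcast2]
    exact ih (a + 1) _ (by omega)

-- running modular product of powers of two = power of the summed exponents, mod M
lemma pvFoldMod (M : Int) (hM : 0 < M) : ∀ (es : List Nat) (c : Int), c % M = c →
    es.foldl (fun acc e => PySem.Int.mod (acc * (2 : Int) ^ e) M) c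
    = (c * 2 ^ es.sum) % M := by
  have key : ∀ a b : Int, (a % M * b) % M = a * b % M := by
    intro a b
    conv_rhs => rw [Int.mul_emod]
    rw [Int.mul_emod, Int.emod_emod_of_dvd _ dvd_rfl]
  intro es
  induction es with
  | nil => intro c hc; simpa using hc.symm
  | cons e t ih =>
    intro c hc
    simp only [List.foldl_cons, PySem.Int.mod_eq_emod_of_pos hM]
    have ihx := ih ((c * 2 ^ e) % M) (Int.emod_emod_of_dvd _ dvd_rfl)
    simp only [PySem.Int.mod_eq_emod_of_pos hM] at ihx
    rw [ihx, key, List.sum_cons, pow_add, mul_assoc]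

-- the value appended for one admissible query is the same in both programs
lemma pvPerQuery (n : Int) (hn : 0 ≤ n) (q : List Int)
    (_h2 : 2 ≤ q.length) (hl : 0 ≤ q.getD 0 0) (hlr : q.getD 0 0 ≤ q.getD 1 0)
    (hr : q.getD 1 0 < (PySem.Int.bitCount n : Int)) :
    (let e : Int :=
      if PySem.List.pyGetD q 0 0 = 0 then
        PySem.List.pyGetD (pvAccum (pvIndexsA n 0) 0) (PySem.List.pyGetD q 1 0) 0
      else PySem.List.pyGetD (pvAccum (pvIndexsA n 0) 0) (PySem.List.pyGetD q 1 0) 0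
           - PySem.List.pyGetD (pvAccum (pvIndexsA n 0) 0) (PySem.List.pyGetD q 0 0 - 1) 0
     PySem.Int.mod ((1 : Int) <<< e.toNat) (10 ^ 9 + 7))
    = (PySem.List.pyRange (PySem.List.pyGetD q 0 0) (PySem.List.pyGetD q 1 0 + 1) 1).foldl
        (fun prod j => PySem.Int.mod (prod * PySem.List.pyGetD (pvPowersB n 1) j 0) (10 ^ 9 + 7)) 1 := by
  have hMpos : (0 : Int) < 10 ^ 9 + 7 := by norm_num
  set es := pvNatBits n.toNat with hes
  have hidx : pvIndexsA n 0 = es.map (fun b : Nat => (b : Int)) := by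
    rw [pvIndexsA_eq n.toNat n 0 rfl]
    exact List.map_congr_left (fun b _ => by simp)
  have hpows : pvPowersB n 1 = es.map (fun b : Nat => (2 : Int) ^ b) := by
    rw [pvPowersB_eq n.toNat n 1 rfl]
    exact List.map_congr_left (fun b _ => by simp)
  have hkey : (es.length : Int) = (PySem.Int.bitCount n : Int) := by
    have := pvNatBits_length n.toNat
    rw [Int.toNat_of_nonneg hn] at this
    exact_mod_cast this
  -- name the two query endpoints
  set l := q.getD 0 0 with hldef
  set r := q.getD 1 0 with hrdef
  have hq0 : PySem.List.pyGetD q 0 0 = l := by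
    rw [PySem.List.pyGetD_zero]
  have hq1 : PySem.List.pyGetD q 1 0 = r := by
    rw [show (1 : Int) = ((1 : Nat) : Int) by norm_num, PySem.List.pyGetD_natCast]
  obtain ⟨L, hL⟩ : ∃ L : Nat, l = (L : Int) := ⟨l.toNat, by omega⟩
  obtain ⟨R, hR⟩ : ∃ R : Nat, r = (R : Int) := ⟨r.toNat, by omega⟩
  have hLR : L ≤ R := by omega
  have hRlen : R < es.length := by omega
  have hlenAcc : (pvAccum (pvIndexsA n 0) 0).length = es.length := by
    rw [pvAccum_length, hidx, List.length_map]
  -- prefix sums of the exponents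
  have hpre : ∀ j : Nat, j < es.length →
      PySem.List.pyGetD (pvAccum (pvIndexsA n 0) 0) ((j : Nat) : Int) 0
        = ((es.take (j + 1)).sum : Int) := by
    intro j hj
    rw [PySem.List.pyGetD_natCast, pvAccum_getD _ 0 j (by rw [hidx, List.length_map]; exact hj)]
    rw [hidx, ← List.map_take, pvCastSum]
    ring
  set S : Nat := ((es.drop L).take (R + 1 - L)).sum with hS
  -- the exponent A computes equals S
  have hsplit : (es.take (R + 1)).sum = (es.take L).sum + S := by
    have h1 : es.take (R + 1) = es.take L ++ (es.drop L).take (R + 1 - L) := by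
      rw [← List.take_add]
      congr 1
      omega
    rw [h1, List.sum_append]
  have heA : (if PySem.List.pyGetD q 0 0 = 0 then
        PySem.List.pyGetD (pvAccum (pvIndexsA n 0) 0) (PySem.List.pyGetD q 1 0) 0
      else PySem.List.pyGetD (pvAccum (pvIndexsA n 0) 0) (PySem.List.pyGetD q 1 0) 0
           - PySem.List.pyGetD (pvAccum (pvIndexsA n 0) 0) (PySem.List.pyGetD q 0 0 - 1) 0)
      = (S : Int) := by
    rw [hq0, hq1, hR]
    by_cases h0 : l = 0
    · rw [if_pos h0]
      rw [hpre R hRlen]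
      have hL0 : L = 0 := by omega
      rw [hS, hL0]
      simp
    · rw [if_neg h0]
      have hL1 : 1 ≤ L := by omega
      have hL' : l - 1 = ((L - 1 : Nat) : Int) := by omega
      rw [hpre R hRlen, hL', hpre (L - 1) (by omega)]
      have : (L - 1) + 1 = L := by omega
      rw [this]
      have := hsplit
      push_cast [this]
      omega
  -- A's value
  have hAval : PySem.Int.mod ((1 : Int) <<< ((S : Int)).toNat) (10 ^ 9 + 7)
      = ((2 : Int) ^ S) % (10 ^ 9 + 7) := by
    rw [PySem.Int.mod_eq_emod_of_pos hMpos, Int.toNat_natCast, Int.shiftLeft_eq, one_mul]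
  -- B's value
  have hBval : (PySem.List.pyRange (PySem.List.pyGetD q 0 0) (PySem.List.pyGetD q 1 0 + 1) 1).foldl
        (fun prod j => PySem.Int.mod (prod * PySem.List.pyGetD (pvPowersB n 1) j 0) (10 ^ 9 + 7)) 1
      = ((2 : Int) ^ S) % (10 ^ 9 + 7) := by
    rw [hq0, hq1, hL, hR]
    have hcast : ((R : Int) + 1) = ((L + (R + 1 - L) : Nat) : Int) := by push_cast; omega
    rw [hcast, pvFoldRange _ _ (R + 1 - L) L 1 (by rw [hpows, List.length_map]; omega)]
    rw [hpows, ← List.map_drop, ← List.map_take, List.foldl_map]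
    rw [pvFoldMod _ hMpos _ 1 (by norm_num), one_mul]
  simp only []
  rw [heA, hAval, hBval]

-- both programs append equal values query by query
lemma pvFoldQueries (n : Int) (hn : 0 ≤ n) :
    ∀ (qs : List (List Int)),
      (∀ q ∈ qs, 2 ≤ q.length ∧ 0 ≤ q.getD 0 0 ∧ q.getD 0 0 ≤ q.getD 1 0 ∧
        q.getD 1 0 < (PySem.Int.bitCount n : Int)) →
    ∀ (ans : List Int),
      qs.foldl (fun ans q =>
        let e : Int :=
          if PySem.List.pyGetD q 0 0 = 0 then
            PySem.List.pyGetD (pvAccum (pvIndexsA n 0) 0) (PySem.List.pyGetD q 1 0) 0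
          else PySem.List.pyGetD (pvAccum (pvIndexsA n 0) 0) (PySem.List.pyGetD q 1 0) 0
               - PySem.List.pyGetD (pvAccum (pvIndexsA n 0) 0) (PySem.List.pyGetD q 0 0 - 1) 0
        ans ++ [PySem.Int.mod ((1 : Int) <<< e.toNat) (10 ^ 9 + 7)]) ans
      = qs.foldl (fun ans q =>
        let prod := (PySem.List.pyRange (PySem.List.pyGetD q 0 0) (PySem.List.pyGetD q 1 0 + 1) 1).foldl
          (fun prod j => PySem.Int.mod (prod * PySem.List.pyGetD (pvPowersB n 1) j 0) (10 ^ 9 + 7)) 1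
        ans ++ [prod]) ans := by
  intro qs
  induction qs with
  | nil => intro _ ans; rfl
  | cons q t ih =>
    intro hq ans
    obtain ⟨hhead, htail⟩ := List.forall_mem_cons.mp hq
    obtain ⟨h2, hl, hlr, hr⟩ := hhead
    simp only [List.foldl_cons]
    rw [pvPerQuery n hn q h2 hl hlr hr]
    exact ih htail _

-- ===== VERDICT (by name: the statement is the Claim_ definition above) =====
theorem productQueries_spec : Claim_equal_productQueries := by
  unfold Claim_equal_productQueries Spec_productQueries
  intro n queries _ hpre
  obtain ⟨hn, hq⟩ := hpre
  unfold productQueries productQueries_alt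
  simp only []
  exact pvFoldQueries n hn queries hq []
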